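-- pv_equiv track=rewrite | github.com/ChunhuiJia/OpendiveStudy | utils.py | get_val_metric_keys
-- ===== SOURCE A (Python) =====
-- def get_val_metric_keys(namespace='val'):  #
--     rtn_dict = dict()
--     rtn_dict.update({'l2_dist': [], 'cls_acc': []})
--
--     # New Metric
--     distance_splits = ((0, 10), (10, 20), (20, 30), (30, 50), (50, 1000))
--     AP_thresholds = (0.5, 1, 2)
--
--     for min_dst, max_dst in distance_splits:  # update：这是字典对象的一个方法，它接受一个字典或一个键值对的迭代器，并将其添加到字典中。如果键已经存在，它的值将被新的值覆盖。
--         rtn_dict.update({'eucliden_%d_%d' % (min_dst, max_dst): []})  # [sum(mask), ]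
--         rtn_dict.update({'eucliden_x_%d_%d' % (min_dst, max_dst): []})  # [sum(mask), ]
--         rtn_dict.update({'eucliden_y_%d_%d' % (min_dst, max_dst): []})  # [sum(mask), ]
--         for AP_threshold in AP_thresholds:
--             rtn_dict.update({'AP_%d_%d_%s' % (min_dst, max_dst, AP_threshold): []})
--
--     # add namespace
--     if namespace is not None:
--         for k in list(rtn_dict.keys()):
--             rtn_dict['%s/%s' % (namespace, k)] = rtn_dict.pop(k)  # pop(k)：这是字典对象的一个方法，它接受一个键 k 作为参数，并从字典中弹出（删除）这个键及其对应的值。如果键 k 存在于字典中，它将返回这个键的值；如果键不存在，可以提供一个默认值，否则会抛出 KeyError。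
--     return rtn_dict
-- ===== SOURCE B (Python) =====
-- # The metric key set is fixed, so list it once as a module-level constant table
-- # and build the dict with a single prefixing comprehension (no generation loops).
-- _VAL_METRIC_KEYS = (
--     'l2_dist', 'cls_acc',
--     'eucliden_0_10', 'eucliden_x_0_10', 'eucliden_y_0_10',
--     'AP_0_10_0.5', 'AP_0_10_1', 'AP_0_10_2',
--     'eucliden_10_20', 'eucliden_x_10_20', 'eucliden_y_10_20',
--     'AP_10_20_0.5', 'AP_10_20_1', 'AP_10_20_2',
--     'eucliden_20_30', 'eucliden_x_20_30', 'eucliden_y_20_30',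
--     'AP_20_30_0.5', 'AP_20_30_1', 'AP_20_30_2',
--     'eucliden_30_50', 'eucliden_x_30_50', 'eucliden_y_30_50',
--     'AP_30_50_0.5', 'AP_30_50_1', 'AP_30_50_2',
--     'eucliden_50_1000', 'eucliden_x_50_1000', 'eucliden_y_50_1000',
--     'AP_50_1000_0.5', 'AP_50_1000_1', 'AP_50_1000_2',
-- )
--
-- def get_val_metric_keys(namespace='val'):
--     if namespace is None:
--         return {k: [] for k in _VAL_METRIC_KEYS}
--     return {'%s/%s' % (namespace, k): [] for k in _VAL_METRIC_KEYS}
-- ===== Notes on version B (the rewrite author's own statement) =====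
-- stated objective: simpler
-- what changed: B replaces A's nested generation loops plus pop/rename second pass with a precomputed literal table of the 32 key names and a single prefixing dict comprehension (closed-form table instead of iteration).
import Mathlib
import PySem

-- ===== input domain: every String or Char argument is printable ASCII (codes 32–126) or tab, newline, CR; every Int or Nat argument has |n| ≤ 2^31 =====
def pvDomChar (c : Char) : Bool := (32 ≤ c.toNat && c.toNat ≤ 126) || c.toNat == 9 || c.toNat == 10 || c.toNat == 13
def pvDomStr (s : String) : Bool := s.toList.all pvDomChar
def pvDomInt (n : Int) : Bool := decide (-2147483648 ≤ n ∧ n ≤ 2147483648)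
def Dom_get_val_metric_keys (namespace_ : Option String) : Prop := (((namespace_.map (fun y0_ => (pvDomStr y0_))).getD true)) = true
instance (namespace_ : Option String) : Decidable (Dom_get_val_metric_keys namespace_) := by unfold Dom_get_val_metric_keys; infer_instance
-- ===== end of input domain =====

-- B replaces A's nested key-generation loops plus pop/rename second pass with a precomputed
-- constant table of the 32 key names and a single prefixing pass (simpler).

-- ===== PORT A =====
-- A-side helper: the dict as built before the namespace-rename loop.
-- '%s' % 0.5 / 1 / 2 formats to "0.5" / "1" / "2": precomputed, exact for these literals.
def pvBuildBase : PySem.Dict String (List Int) :=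
  let d0 : PySem.Dict String (List Int) :=
    (PySem.Dict.empty).update [("l2_dist", []), ("cls_acc", [])]
  let distance_splits : List (Int × Int) := [(0, 10), (10, 20), (20, 30), (30, 50), (50, 1000)]
  let AP_thresholds : List String := ["0.5", "1", "2"]
  distance_splits.foldl (fun d p =>
    let d := d.update [("eucliden_" ++ PySem.Int.toStr p.1 ++ "_" ++ PySem.Int.toStr p.2, [])]
    let d := d.update [("eucliden_x_" ++ PySem.Int.toStr p.1 ++ "_" ++ PySem.Int.toStr p.2, [])]
    let d := d.update [("eucliden_y_" ++ PySem.Int.toStr p.1 ++ "_" ++ PySem.Int.toStr p.2, [])]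
    AP_thresholds.foldl (fun d t =>
      d.update [("AP_" ++ PySem.Int.toStr p.1 ++ "_" ++ PySem.Int.toStr p.2 ++ "_" ++ t, [])]) d) d0

def get_val_metric_keys (namespace_ : Option String) : List (String × List Int) :=
  let rtn_dict := pvBuildBase
  let rtn_dict :=
    match namespace_ with
    | none => rtn_dict
    | some ns =>
      -- for k in list(rtn_dict.keys()): rtn_dict['%s/%s' % (ns, k)] = rtn_dict.pop(k)
      (rtn_dict.keys).foldl (fun d k =>
        match d.pop? k with
        | some (v, d') => d'.insert (ns ++ "/" ++ k) v
        | none => d  -- pop raises KeyError; unreachable here (k is always a current key)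
        ) rtn_dict
  rtn_dict.items

-- ===== PORT B =====
-- B's module-level constant table _VAL_METRIC_KEYS.
def pvValMetricKeyTable : List String :=
  ["l2_dist", "cls_acc",
   "eucliden_0_10", "eucliden_x_0_10", "eucliden_y_0_10", "AP_0_10_0.5", "AP_0_10_1", "AP_0_10_2",
   "eucliden_10_20", "eucliden_x_10_20", "eucliden_y_10_20", "AP_10_20_0.5", "AP_10_20_1", "AP_10_20_2",
   "eucliden_20_30", "eucliden_x_20_30", "eucliden_y_20_30", "AP_20_30_0.5", "AP_20_30_1", "AP_20_30_2",
   "eucliden_30_50", "eucliden_x_30_50", "eucliden_y_30_50", "AP_30_50_0.5", "AP_30_50_1", "AP_30_50_2",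
   "eucliden_50_1000", "eucliden_x_50_1000", "eucliden_y_50_1000", "AP_50_1000_0.5", "AP_50_1000_1", "AP_50_1000_2"]

def get_val_metric_keys_alt (namespace_ : Option String) : List (String × List Int) :=
  match namespace_ with
  | none => pvValMetricKeyTable.map (fun k => (k, ([] : List Int)))
  | some ns => pvValMetricKeyTable.map (fun k => (ns ++ "/" ++ k, ([] : List Int)))

-- ===== PRECONDITION & SPEC =====
def Spec_get_val_metric_keys (namespace_ : Option String) (out : List (String × List Int)) : Prop := out = get_val_metric_keys_alt namespace_
instance (namespace_ : Option String) (out : List (String × List Int)) : Decidable (Spec_get_val_metric_keys namespace_ out) := by unfold Spec_get_val_metric_keys; infer_instance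

-- ===== CLAIM (what is proved, stated in full; the proofs are below) =====
def Claim_equal_get_val_metric_keys : Prop := ∀ (namespace_ : Option String), Dom_get_val_metric_keys namespace_ → Spec_get_val_metric_keys namespace_ (get_val_metric_keys namespace_)

-- ===== LEMMAS AND PROOFS =====

set_option maxRecDepth 20000 in
theorem pvBuildBase_eq : pvBuildBase = PySem.Dict.mk (pvValMetricKeyTable.map (fun k => (k, ([] : List Int)))) := by
  decide

theorem pref_ne_of_no_slash (ns k b : String) (hb : '/' ∉ b.toList) :
    ns ++ "/" ++ k ≠ b := by
  intro h
  apply hb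
  rw [← h]
  simp [String.toList_append]

theorem pref_inj (ns a b : String) (h : ns ++ "/" ++ a = ns ++ "/" ++ b) : a = b := by
  have hd : (ns ++ "/" ++ a).toList = (ns ++ "/" ++ b).toList := by rw [h]
  simp only [String.toList_append, List.append_cancel_left_eq] at hd
  exact String.toList_injective hd

-- One pass of the rename loop over `rest`, with `done` already renamed.
theorem rename_loop (ns : String) :
    ∀ (rest done : List String),
      (∀ b ∈ rest, '/' ∉ b.toList) →
      (∀ b ∈ rest, b ∉ done) →
      rest.Nodup →
      rest.foldl (fun d k =>
          match PySem.Dict.pop? d k with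
          | some (v, d') => d'.insert (ns ++ "/" ++ k) v
          | none => d)
        (PySem.Dict.mk (rest.map (fun k => (k, ([] : List Int)))
            ++ done.map (fun k => (ns ++ "/" ++ k, ([] : List Int)))))
      = PySem.Dict.mk ((done ++ rest).map (fun k => (ns ++ "/" ++ k, ([] : List Int)))) := by
  intro rest
  induction rest with
  | nil => intro done _ _ _; simp
  | cons k rs ih =>
    intro done hslash hdisj hnd
    have hk_slash : '/' ∉ k.toList := hslash k (by simp)
    have hk_rs : k ∉ rs := (List.nodup_cons.mp hnd).1
    have hk_done : k ∉ done := hdisj k (by simp)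
    rw [List.foldl_cons]
    -- evaluate one loop step
    have hstep :
        (match PySem.Dict.pop?
            (PySem.Dict.mk ((k :: rs).map (fun k => (k, ([] : List Int)))
              ++ done.map (fun k => (ns ++ "/" ++ k, ([] : List Int))))) k with
          | some (v, d') => d'.insert (ns ++ "/" ++ k) v
          | none => PySem.Dict.mk ((k :: rs).map (fun k => (k, ([] : List Int)))
              ++ done.map (fun k => (ns ++ "/" ++ k, ([] : List Int)))))
        = PySem.Dict.mk (rs.map (fun k => (k, ([] : List Int)))
            ++ (done ++ [k]).map (fun k => (ns ++ "/" ++ k, ([] : List Int)))) := by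
      have hget :
          (PySem.Dict.mk ((k :: rs).map (fun k => (k, ([] : List Int)))
            ++ done.map (fun k => (ns ++ "/" ++ k, ([] : List Int))))).get? k
          = some ([] : List Int) := by
        simp [PySem.Dict.get?_mk_cons]
      have herase :
          (PySem.Dict.mk ((k :: rs).map (fun k => (k, ([] : List Int)))
            ++ done.map (fun k => (ns ++ "/" ++ k, ([] : List Int))))).erase k
          = PySem.Dict.mk (rs.map (fun k => (k, ([] : List Int)))
            ++ done.map (fun k => (ns ++ "/" ++ k, ([] : List Int)))) := by
        simp only [PySem.Dict.erase, List.map_cons, List.cons_append, List.filter_cons,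
          List.filter_append, PySem.Dict.mk.injEq, beq_self_eq_true, Bool.not_true,
          Bool.false_eq_true, if_false]
        have h1 : List.filter (fun p => !p.1 == k) (rs.map (fun k => (k, ([] : List Int))))
            = rs.map (fun k => (k, ([] : List Int))) := by
          rw [List.filter_eq_self]
          intro p hp
          obtain ⟨b, hb, rfl⟩ := List.mem_map.mp hp
          simp only [Bool.not_eq_true', beq_eq_false_iff_ne, ne_eq]
          intro h; exact hk_rs (h ▸ hb)
        have h2 : List.filter (fun p => !p.1 == k)
              (done.map (fun k => (ns ++ "/" ++ k, ([] : List Int))))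
            = done.map (fun k => (ns ++ "/" ++ k, ([] : List Int))) := by
          rw [List.filter_eq_self]
          intro p hp
          obtain ⟨b, hb, rfl⟩ := List.mem_map.mp hp
          simp only [Bool.not_eq_true', beq_eq_false_iff_ne, ne_eq]
          exact pref_ne_of_no_slash ns b k hk_slash
        rw [h1, h2]
      have hnotc :
          (PySem.Dict.mk (rs.map (fun k => (k, ([] : List Int)))
            ++ done.map (fun k => (ns ++ "/" ++ k, ([] : List Int))))).contains (ns ++ "/" ++ k)
          = false := by
        simp only [PySem.Dict.contains_mk, List.any_append, Bool.or_eq_false_iff]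
        constructor
        · rw [List.any_eq_false]
          intro p hp
          obtain ⟨b, hb, rfl⟩ := List.mem_map.mp hp
          simp only [beq_iff_eq]
          exact fun h => pref_ne_of_no_slash ns k b (hslash b (by simp [hb])) h.symm
        · rw [List.any_eq_false]
          intro p hp
          obtain ⟨b, hb, rfl⟩ := List.mem_map.mp hp
          simp only [beq_iff_eq]
          exact fun h => hk_done ((pref_inj ns b k h) ▸ hb)
      rw [PySem.Dict.pop?, hget]
      simp only [Option.map_some]
      rw [herase, PySem.Dict.insert, hnotc]
      simp
    rw [hstep, ih (done ++ [k])
      (fun b hb => hslash b (by simp [hb]))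
      (fun b hb => by
        simp only [List.mem_append, List.mem_singleton, not_or]
        exact ⟨hdisj b (by simp [hb]), fun h => hk_rs (h ▸ hb)⟩)
      (List.nodup_cons.mp hnd).2]
    simp

-- ===== VERDICT (by name: the statement is the Claim_ definition above) =====
set_option maxRecDepth 20000 in
theorem get_val_metric_keys_spec : Claim_equal_get_val_metric_keys := by
  intro namespace_ _
  unfold Spec_get_val_metric_keys
  cases namespace_ with
  | none => decide
  | some ns =>
    show (pvBuildBase.keys.foldl _ pvBuildBase).items = _
    rw [pvBuildBase_eq]
    have hkeys : (PySem.Dict.mk (pvValMetricKeyTable.map (fun k => (k, ([] : List Int))))).keys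
        = pvValMetricKeyTable := by decide
    rw [hkeys]
    have := rename_loop ns pvValMetricKeyTable []
      (by decide) (by simp) (by decide)
    simp only [List.map_nil, List.append_nil, List.nil_append] at this
    rw [this]
    simp [get_val_metric_keys_alt]
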